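-- pv_equiv track=rewrite | github.com/s0fiateixeira/FEUP_FPRO | RE - Away Assignments/RE05/aDigits.py | adigits
-- ===== SOURCE A (Python) =====
-- def adigits(num1, num2, num3):
--     n1=int(num1)
--     n2=int(num2)
--     n3=int(num3)
--     while (n1>=n2 and n1>=n3):
--         if n2>=n3:
--             n1=n1*100
--             n2=n2*10
--             final=n1+n2+n3
--         else:
--             n1=n1*100
--             n3=n3*10
--             final=n1+n2+n3
--         return final
--
--     while (n2>=n1 and n2>=n3):
--         if n1>=n3:
--             n2=n2*100
--             n1=n1*10
--             final=n1+n2+n3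
--         else:
--             n2=n2*100
--             n3=n3*10
--             final=n1+n2+n3
--         return final
--
--     while (n3>=n2 and n3>=n1):
--         if n1>=n2:
--             n3=n3*100
--             n1=n1*10
--             final=n1+n2+n3
--         else:
--             n3=n3*100
--             n2=n2*10
--             final=n1+n2+n3
--         return final
-- ===== SOURCE B (Python) =====
-- def adigits(num1, num2, num3):
--     vals = sorted([int(num1), int(num2), int(num3)], reverse=True)
--     return 100 * vals[0] + 10 * vals[1] + vals[2]
-- ===== Notes on version B (the rewrite author's own statement) =====
-- stated objective: simpler
-- what changed: Replaced the three while/if cascades that hand-pick max, mid and min with a single descending sort of the three values and a closed-form positional weighting 100*max + 10*mid + min.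
import Mathlib
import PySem

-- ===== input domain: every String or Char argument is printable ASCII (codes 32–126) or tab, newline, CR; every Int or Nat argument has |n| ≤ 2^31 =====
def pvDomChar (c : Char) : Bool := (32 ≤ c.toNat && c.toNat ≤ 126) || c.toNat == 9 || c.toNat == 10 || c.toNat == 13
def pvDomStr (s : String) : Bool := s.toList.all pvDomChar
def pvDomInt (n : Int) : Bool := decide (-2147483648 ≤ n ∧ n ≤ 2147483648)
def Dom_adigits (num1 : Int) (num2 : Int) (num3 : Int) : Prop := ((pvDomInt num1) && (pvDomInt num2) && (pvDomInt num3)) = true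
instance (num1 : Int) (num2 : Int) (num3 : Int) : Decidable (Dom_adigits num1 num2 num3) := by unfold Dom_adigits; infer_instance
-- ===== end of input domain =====

-- B replaces A's three-way branch cascade with one descending sort and the closed form 100*max + 10*mid + min (simpler, same cost).


-- ===== PORT A =====
-- int(num1) etc. are identity on ints; each Python `while` returns on its first
-- iteration, so the cascade is an if-chain.  If all three guards failed Python would
-- fall off and return None, but the third guard follows from the negation of the
-- first two, so the final `else 0` arm is unreachable.
def adigits (num1 : Int) (num2 : Int) (num3 : Int) : Int :=
  let n1 := num1
  let n2 := num2
  let n3 := num3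
  if n1 ≥ n2 ∧ n1 ≥ n3 then
    if n2 ≥ n3 then n1 * 100 + n2 * 10 + n3 else n1 * 100 + n2 + n3 * 10
  else if n2 ≥ n1 ∧ n2 ≥ n3 then
    if n1 ≥ n3 then n1 * 10 + n2 * 100 + n3 else n1 + n2 * 100 + n3 * 10
  else if n3 ≥ n2 ∧ n3 ≥ n1 then
    if n1 ≥ n2 then n1 * 10 + n2 + n3 * 100 else n1 + n2 * 10 + n3 * 100
  else 0  -- unreachable (Python would return None here; provably never taken)

-- ===== PORT B =====
-- Source B: sort the three values descending, then weight positionally.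
-- vals[i] is always in range (the list has 3 elements), so pyGet? never misses;
-- .getD 0 only discharges the Option.
def adigits_alt (num1 : Int) (num2 : Int) (num3 : Int) : Int :=
  let vals := PySem.List.sorted [num1, num2, num3] (fun x => x) true
  100 * (PySem.List.pyGet? vals 0).getD 0 + 10 * (PySem.List.pyGet? vals 1).getD 0
    + (PySem.List.pyGet? vals 2).getD 0

-- ===== PRECONDITION & SPEC =====
def Spec_adigits (num1 : Int) (num2 : Int) (num3 : Int) (out : Int) : Prop := out = adigits_alt num1 num2 num3
instance (num1 : Int) (num2 : Int) (num3 : Int) (out : Int) : Decidable (Spec_adigits num1 num2 num3 out) := by unfold Spec_adigits; infer_instance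

-- ===== CLAIM (what is proved, stated in full; the proofs are below) =====
def Claim_equal_adigits : Prop := ∀ (num1 : Int) (num2 : Int) (num3 : Int), Dom_adigits num1 num2 num3 → Spec_adigits num1 num2 num3 (adigits num1 num2 num3)

-- ===== LEMMAS AND PROOFS =====

-- ===== VERDICT (by name: the statement is the Claim_ definition above) =====
-- closed-form evaluation of the descending insertion sort on a 3-element list
theorem sorted3 (a b c : Int) :
    PySem.List.sorted [a, b, c] (fun x => x) true =
      if b ≤ a then (if c ≤ b then [a, b, c] else if c ≤ a then [a, c, b] else [c, a, b])
      else (if c ≤ a then [b, a, c] else if c ≤ b then [b, c, a] else [c, b, a]) := by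
  simp only [PySem.List.sorted]
  repeat' (first | rfl | omega | split_ifs <;> simp [PySem.List.insertBy])

theorem adigits_spec : Claim_equal_adigits := by
  intro n1 n2 n3 _
  unfold Spec_adigits adigits adigits_alt
  rw [sorted3]
  split_ifs <;> simp [PySem.List.pyGet?, PySem.List.pyIdx?] <;> omega
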